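-- pv_equiv track=rewrite | github.com/quetzal77/AIAschool_task4 | agentic_chatbot_src/content_scrapper.py | _separate_headers_and_rows
-- ===== SOURCE A (Python) =====
-- def filter_rows(table):
--     """
--     Filters rows in the table:
--     1. Removes empty rows.
--     2. Keeps rows where the first cell is empty but the row has more than one element.
--     """
--     filtered_rows = []
--     for row in table:
--         if not row or all(cell.strip() == "" for cell in row):
--             continue  # Skip completely empty rows
--         if row[0].strip() == "" and len(row) > 1:  # Keep rows with empty first cell but multiple elements
--             filtered_rows.append(row)
--         elif any(cell.strip() != "" for cell in row):  # Keep rows with at least one non-empty cell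
--             filtered_rows.append(row)
--     return filtered_rows
--
-- def _separate_headers_and_rows(table):
--     # Separates header rows (rows with a single element) from table data rows.
--     headers = []
--     rows = []
--
--     for row in table:
--         if len(row) == 1:  # Identify header rows
--             headers.append(row[0])  # Collect the single element as a header
--         elif len(row) > 1:  # Identify table data rows
--             rows.append(row)
--
--     #     Filters rows in the table:
--     #     1. Removes empty rows.
--     #     2. Keeps rows where the first cell is empty but the row has more than one element.
--     rows = filter_rows(rows)
--     return headers, rows
-- ===== SOURCE B (Python) =====
-- def _separate_headers_and_rows(table):
--     # One pass: single-element rows become headers; multi-element rows are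
--     # kept iff they have at least one non-empty cell (the net effect of
--     # the original separate-then-filter_rows pipeline).
--     headers = []
--     rows = []
--     for row in table:
--         if len(row) == 1:
--             headers.append(row[0])
--         elif len(row) > 1 and any(cell.strip() != "" for cell in row):
--             rows.append(row)
--     return headers, rows
-- ===== Notes on version B (the rewrite author's own statement) =====
-- stated objective: simpler
-- what changed: Replaces the two-pass pipeline (separate headers/rows, then the multi-branch filter_rows helper) with one loop whose single inlined condition 'multi-element row with some non-empty cell' is the proved net effect of filter_rows on multi-element rows.
import Mathlib
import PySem

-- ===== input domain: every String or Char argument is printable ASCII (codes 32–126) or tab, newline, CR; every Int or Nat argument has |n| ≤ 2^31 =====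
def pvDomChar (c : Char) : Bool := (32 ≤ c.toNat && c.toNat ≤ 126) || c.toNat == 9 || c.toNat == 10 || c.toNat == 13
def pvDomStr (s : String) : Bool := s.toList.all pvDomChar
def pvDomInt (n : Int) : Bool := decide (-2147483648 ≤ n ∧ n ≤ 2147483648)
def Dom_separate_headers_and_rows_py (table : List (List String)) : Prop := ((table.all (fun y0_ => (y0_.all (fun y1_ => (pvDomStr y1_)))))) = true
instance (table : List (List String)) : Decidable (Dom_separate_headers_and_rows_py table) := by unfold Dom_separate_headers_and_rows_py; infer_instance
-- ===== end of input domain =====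

-- B replaces A's two passes (separate, then filter_rows) by one loop with the inlined
-- net condition 'multi-element row with some non-empty cell'; return value only, no mutation.

-- ===== PORT A =====
-- filter_rows, transliterated branch for branch (append-loop → foldl over the accumulator)
def filterRowsA (table : List (List String)) : List (List String) :=
  table.foldl
    (fun acc row =>
      if row = [] ∨ row.all (fun cell => PySem.Str.strip cell == "") then acc
      else if PySem.Str.strip (row.headD "") == "" ∧ row.length > 1 then acc ++ [row]
      else if row.any (fun cell => PySem.Str.strip cell != "") then acc ++ [row]
      else acc)
    []

def separate_headers_and_rows_py (table : List (List String)) : List String × List (List String) :=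
  let p :=
    table.foldl
      (fun (p : List String × List (List String)) row =>
        if row.length = 1 then (p.1 ++ [row.headD ""], p.2)
        else if row.length > 1 then (p.1, p.2 ++ [row])
        else p)
      ([], [])
  (p.1, filterRowsA p.2)

-- ===== PORT B =====
def separate_headers_and_rows_py_alt (table : List (List String)) : List String × List (List String) :=
  table.foldl
    (fun (p : List String × List (List String)) row =>
      if row.length = 1 then (p.1 ++ [row.headD ""], p.2)
      else if row.length > 1 ∧ row.any (fun cell => PySem.Str.strip cell != "") then
        (p.1, p.2 ++ [row])
      else p)
    ([], [])

-- ===== PRECONDITION & SPEC =====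
def Spec_separate_headers_and_rows_py (table : List (List String)) (out : List String × List (List String)) : Prop := out = separate_headers_and_rows_py_alt table
instance (table : List (List String)) (out : List String × List (List String)) : Decidable (Spec_separate_headers_and_rows_py table out) := by unfold Spec_separate_headers_and_rows_py; infer_instance

-- ===== CLAIM (what is proved, stated in full; the proofs are below) =====
def Claim_equal_separate_headers_and_rows_py : Prop := ∀ (table : List (List String)), Dom_separate_headers_and_rows_py table → Spec_separate_headers_and_rows_py table (separate_headers_and_rows_py table)

-- ===== LEMMAS AND PROOFS =====

-- a row has some non-empty cell (after strip)
def rowNE (row : List String) : Bool := row.any (fun cell => PySem.Str.strip cell != "")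

-- filter_rows keeps exactly the rows with some non-empty cell
lemma filterRowsA_eq (start : List (List String)) (xs : List (List String)) :
    xs.foldl
      (fun acc row =>
        if row = [] ∨ row.all (fun cell => PySem.Str.strip cell == "") then acc
        else if PySem.Str.strip (row.headD "") == "" ∧ row.length > 1 then acc ++ [row]
        else if row.any (fun cell => PySem.Str.strip cell != "") then acc ++ [row]
        else acc)
      start = start ++ xs.filter rowNE := by
  induction xs generalizing start with
  | nil => simp
  | cons row rest ih =>
    have hrow : (if row = [] ∨ row.all (fun cell => PySem.Str.strip cell == "") then start
        else if PySem.Str.strip (row.headD "") == "" ∧ row.length > 1 then start ++ [row]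
        else if row.any (fun cell => PySem.Str.strip cell != "") then start ++ [row]
        else start) = start ++ (if rowNE row then [row] else []) := by
      by_cases h : row = [] ∨ row.all (fun cell => PySem.Str.strip cell == "")
      · have : rowNE row = false := by
          rcases h with h | h
          · simp [rowNE, h]
          · simp only [rowNE, List.any_eq_false]
            intro c hc
            have := List.all_eq_true.mp h c hc
            simpa using this
        rw [if_pos h, this]
        simp
      · have hne : rowNE row = true := by
          simp only [rowNE, List.any_eq_true]
          by_contra hc
          push Not at hc
          apply h
          right
          simp only [List.all_eq_true]
          intro c hcm
          have := hc c hcm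
          simpa using this
        simp only [rowNE] at hne
        by_cases h2 : (PySem.Str.strip (row.headD "") == "") = true ∧ row.length > 1
        · rw [if_neg h, if_pos h2]; simp [rowNE, hne]
        · rw [if_neg h, if_neg h2, if_pos hne]; simp [rowNE, hne]
    rw [List.foldl_cons, hrow, ih]
    by_cases h : rowNE row = true <;> simp [h]

-- A's separating loop, characterized (headers as filterMap, rows as filter on length)
lemma foldA_eq (xs : List (List String)) (hs : List String) (rs : List (List String)) :
    xs.foldl
      (fun (p : List String × List (List String)) row =>
        if row.length = 1 then (p.1 ++ [row.headD ""], p.2)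
        else if row.length > 1 then (p.1, p.2 ++ [row])
        else p)
      (hs, rs)
    = (hs ++ xs.filterMap (fun row => if row.length = 1 then some (row.headD "") else none),
       rs ++ xs.filter (fun row => decide (row.length > 1))) := by
  induction xs generalizing hs rs with
  | nil => simp
  | cons row rest ih =>
    rw [List.foldl_cons]
    by_cases h1 : row.length = 1
    · rw [if_pos h1, ih]
      simp [h1]
    · rw [if_neg h1]
      by_cases h2 : row.length > 1
      · rw [if_pos h2, ih]
        simp [h1, h2]
      · rw [if_neg h2, ih]
        simp [h1, h2]

-- B's loop, characterized
lemma foldB_eq (xs : List (List String)) (hs : List String) (rs : List (List String)) :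
    xs.foldl
      (fun (p : List String × List (List String)) row =>
        if row.length = 1 then (p.1 ++ [row.headD ""], p.2)
        else if row.length > 1 ∧ row.any (fun cell => PySem.Str.strip cell != "") then
          (p.1, p.2 ++ [row])
        else p)
      (hs, rs)
    = (hs ++ xs.filterMap (fun row => if row.length = 1 then some (row.headD "") else none),
       rs ++ xs.filter (fun row => decide (row.length > 1) && rowNE row)) := by
  induction xs generalizing hs rs with
  | nil => simp
  | cons row rest ih =>
    rw [List.foldl_cons]
    by_cases h1 : row.length = 1
    · rw [if_pos h1, ih]
      simp [h1]
    · rw [if_neg h1]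
      by_cases h2 : row.length > 1 ∧ (row.any (fun cell => PySem.Str.strip cell != "")) = true
      · rw [if_pos h2, ih]
        have hb : (decide (row.length > 1) && rowNE row) = true := by
          simp only [rowNE, Bool.and_eq_true, decide_eq_true_eq]
          exact h2
        simp [h1, hb]
      · rw [if_neg h2, ih]
        have hb : (decide (row.length > 1) && rowNE row) = false := by
          simp only [rowNE, Bool.and_eq_false_iff]
          by_cases hl : row.length > 1
          · right
            simp only [List.any_eq_false]
            intro c hc hcne
            exact h2 ⟨hl, List.any_eq_true.mpr ⟨c, hc, by simpa using hcne⟩⟩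
          · left; simpa using hl
        simp [h1, hb]

-- ===== VERDICT (by name: the statement is the Claim_ definition above) =====
theorem separate_headers_and_rows_py_spec : Claim_equal_separate_headers_and_rows_py := by
  intro table _
  unfold Spec_separate_headers_and_rows_py
  unfold separate_headers_and_rows_py separate_headers_and_rows_py_alt filterRowsA
  rw [foldA_eq, foldB_eq]
  dsimp only
  rw [filterRowsA_eq]
  simp [List.filter_filter, Bool.and_comm]
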